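-- pv_equiv track=rewrite | github.com/YumengMa01/WellbeingNetworks | roi_isrsa_funcs.py | roi_process_assign
-- ===== SOURCE A (Python) =====
-- def roi_process_assign(roi_num, n_round):
--     if roi_num % n_round == 0:
--         n_roi = int(roi_num/n_round)
--         proc_roi_list = []
--         for p in range(n_round):
--             one_proc_roi_list = []
--             for r in range(n_roi):
--                 one_proc_roi_list.append(str(n_roi*p+r+1))
--             proc_roi_list.append(one_proc_roi_list)
--     else:
--         n_roi = roi_num//(n_round-1)
--         proc_roi_list = []
--         for p in range(n_round):
--             if p<= n_round-2:
--                 one_proc_roi_list = []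
--                 for r in range(n_roi):
--                     one_proc_roi_list.append(str(n_roi*p+r+1))
--                 proc_roi_list.append(one_proc_roi_list)
--             else:
--                 final_proc_roi_list = []
--                 for r in range(roi_num-n_roi*(n_round-1)):
--                     final_proc_roi_list.append(str(n_roi*p+r+1))
--                 proc_roi_list.append(final_proc_roi_list)
--
--     return proc_roi_list
-- ===== SOURCE B (Python) =====
-- # Inverted traversal: one pass over the ROI indices, each appended to the round it belongs to,
-- # instead of per-round nested loops; returns empty rounds for a negative roi_num (A emits a stray
-- # negative label there) and [] when n_round <= 0 (A raises ZeroDivisionError at n_round == 0).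
-- def roi_process_assign(roi_num, n_round):
--     proc_roi_list = [[] for _ in range(n_round)]
--     if n_round >= 1:
--         if roi_num % n_round == 0:
--             n_roi = roi_num // n_round
--         else:
--             n_roi = roi_num // (n_round - 1)
--         for i in range(roi_num):
--             if n_roi > 0 and i // n_roi < n_round - 1:
--                 b = i // n_roi
--             else:
--                 b = n_round - 1
--             proc_roi_list[b].append(str(i + 1))
--     return proc_roi_list
-- ===== Notes on version B (the rewrite author's own statement) =====
-- stated objective: alternative
-- what changed: B inverts the traversal: instead of A's per-round nested loops that recompute every label as str(n_roi*p+r+1), B makes a single pass over the ROI indices 1..roi_num and appends each label to the round bucket it belongs to (bucket = min(i//n_roi, n_round-1)).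
-- intended difference: For negative roi_num that is not divisible by n_round nor by n_round-1 (n_round>=2), A returns a stray final round of bogus negative labels such as ['-5'] while B returns all-empty rounds, the intended result for a non-positive ROI count. — e.g. on roi_process_assign(-5, 3): A returns [[], [], ["-5"]], B returns [[], [], []]
import Mathlib
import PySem

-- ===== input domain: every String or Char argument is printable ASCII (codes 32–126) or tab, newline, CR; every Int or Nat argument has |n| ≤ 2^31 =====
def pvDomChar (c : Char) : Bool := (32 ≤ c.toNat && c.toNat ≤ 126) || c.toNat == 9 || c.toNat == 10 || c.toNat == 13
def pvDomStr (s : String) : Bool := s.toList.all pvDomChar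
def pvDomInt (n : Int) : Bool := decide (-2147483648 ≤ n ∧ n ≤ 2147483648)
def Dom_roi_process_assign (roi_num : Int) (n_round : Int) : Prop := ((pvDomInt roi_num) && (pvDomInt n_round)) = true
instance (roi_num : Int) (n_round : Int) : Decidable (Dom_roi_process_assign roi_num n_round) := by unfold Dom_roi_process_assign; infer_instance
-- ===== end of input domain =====

-- B inverts the traversal: one pass over the ROI indices, each label appended to the round
-- bucket it belongs to, instead of A's per-round nested loops; objective: alternative algorithm.

-- ===== PORT A =====
-- literal transliteration of A; int(roi_num/n_round) is PySem.Int.truncdiv (exact for |·| < 2^53, i.e. on Dom)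
def roi_process_assign (roi_num : Int) (n_round : Int) : List (List String) :=
  if PySem.Int.mod roi_num n_round = 0 then
    let n_roi := PySem.Int.truncdiv roi_num n_round
    (PySem.List.pyRange 0 n_round 1).foldl (fun acc p =>
      acc ++ [(PySem.List.pyRange 0 n_roi 1).foldl
        (fun inner r => inner ++ [PySem.Int.toStr (n_roi * p + r + 1)]) []]) []
  else
    let n_roi := PySem.Int.floordiv roi_num (n_round - 1)
    (PySem.List.pyRange 0 n_round 1).foldl (fun acc p =>
      if p ≤ n_round - 2 then
        acc ++ [(PySem.List.pyRange 0 n_roi 1).foldl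
          (fun inner r => inner ++ [PySem.Int.toStr (n_roi * p + r + 1)]) []]
      else
        acc ++ [(PySem.List.pyRange 0 (roi_num - n_roi * (n_round - 1)) 1).foldl
          (fun inner r => inner ++ [PySem.Int.toStr (n_roi * p + r + 1)]) []]) []

-- ===== PORT B =====
-- '[[] for _ in range(n_round)]' is List.replicate n_round.toNat [] (empty for n_round ≤ 0);
-- 'proc_roi_list[b].append(x)' is set b (getD b ++ [x]) — b is always a valid non-negative index here.
def roi_process_assign_alt (roi_num : Int) (n_round : Int) : List (List String) :=
  let proc_roi_list : List (List String) := List.replicate n_round.toNat []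
  if 1 ≤ n_round then
    let n_roi := if PySem.Int.mod roi_num n_round = 0
                 then PySem.Int.floordiv roi_num n_round
                 else PySem.Int.floordiv roi_num (n_round - 1)
    (PySem.List.pyRange 0 roi_num 1).foldl (fun bs i =>
      let b := if 0 < n_roi ∧ PySem.Int.floordiv i n_roi < n_round - 1
               then PySem.Int.floordiv i n_roi
               else n_round - 1
      bs.set b.toNat ((bs.getD b.toNat []) ++ [PySem.Int.toStr (i + 1)])) proc_roi_list
  else proc_roi_list

-- ===== PRECONDITION & SPEC =====
-- Pre_ excludes exactly n_round = 0, where Python's 'roi_num % n_round' raises ZeroDivisionError.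
def Pre_roi_process_assign (roi_num : Int) (n_round : Int) : Prop := n_round ≠ 0
instance (roi_num : Int) (n_round : Int) : Decidable (Pre_roi_process_assign roi_num n_round) := by unfold Pre_roi_process_assign; infer_instance
def pvWitness_roi_process_assign : Int × Int := (7, 3)

-- For negative roi_num not divisible by n_round nor by n_round-1 (n_round ≥ 2), A returns a stray
-- final round of bogus negative labels (e.g. ['-5']) while B returns all-empty rounds, the intended
-- result for a non-positive ROI count.
def D_roi_process_assign (roi_num : Int) (n_round : Int) : Prop :=
  (decide (roi_num < 0) && decide (2 ≤ n_round) && !(decide (PySem.Int.mod roi_num n_round = 0))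
    && !(decide (PySem.Int.mod roi_num (n_round - 1) = 0))) = true
instance (roi_num : Int) (n_round : Int) : Decidable (D_roi_process_assign roi_num n_round) := by unfold D_roi_process_assign; infer_instance

def Spec_roi_process_assign (roi_num : Int) (n_round : Int) (out : List (List String)) : Prop := ¬ D_roi_process_assign roi_num n_round → out = roi_process_assign_alt roi_num n_round
instance (roi_num : Int) (n_round : Int) (out : List (List String)) : Decidable (Spec_roi_process_assign roi_num n_round out) := by unfold Spec_roi_process_assign; infer_instance

def pvDiffWitness_roi_process_assign : Int × Int := (-5, 3)
def pvDiffWitnessOut_roi_process_assign : (List (List String)) × (List (List String)) := ([[], [], ["-5"]], [[], [], []])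

-- ===== CLAIM (what is proved, stated in full; the proofs are below) =====
def Claim_unchanged_roi_process_assign : Prop := ∀ (roi_num : Int) (n_round : Int), Dom_roi_process_assign roi_num n_round → Pre_roi_process_assign roi_num n_round → Spec_roi_process_assign roi_num n_round (roi_process_assign roi_num n_round)
def Claim_changed_roi_process_assign : Prop := Dom_roi_process_assign (pvDiffWitness_roi_process_assign.1) (pvDiffWitness_roi_process_assign.2) ∧ Pre_roi_process_assign (pvDiffWitness_roi_process_assign.1) (pvDiffWitness_roi_process_assign.2) ∧ D_roi_process_assign (pvDiffWitness_roi_process_assign.1) (pvDiffWitness_roi_process_assign.2) ∧ roi_process_assign (pvDiffWitness_roi_process_assign.1) (pvDiffWitness_roi_process_assign.2) = pvDiffWitnessOut_roi_process_assign.1 ∧ roi_process_assign_alt (pvDiffWitness_roi_process_assign.1) (pvDiffWitness_roi_process_assign.2) = pvDiffWitnessOut_roi_process_assign.2 ∧ pvDiffWitnessOut_roi_process_assign.1 ≠ pvDiffWitnessOut_roi_process_assign.2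

-- ===== LEMMAS AND PROOFS =====

theorem pvD_iff (rn k : Int) :
    D_roi_process_assign rn k ↔
      (rn < 0 ∧ 2 ≤ k ∧ PySem.Int.mod rn k ≠ 0 ∧ PySem.Int.mod rn (k-1) ≠ 0) := by
  unfold D_roi_process_assign
  simp [and_assoc]

-- a chunk of consecutive labels str(c+1), ..., str(c+n)
def pvChunk (c n : Int) : List String :=
  (List.range n.toNat).map (fun (k : Nat) => PySem.Int.toStr (c + 1 + (k : Int)))

theorem pvChunkA (c n : Int) :
    (PySem.List.pyRange 0 n 1).foldl
      (fun inner r => inner ++ [PySem.Int.toStr (c + r + 1)]) [] = pvChunk c n := by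
  rw [PySem.List.foldl_append_singleton_eq_map, PySem.List.pyRange_one]
  simp only [pvChunk, List.map_map, List.nil_append]
  have h : (n - 0).toNat = n.toNat := by omega
  rw [h]
  apply List.map_congr_left
  intro k _
  simp only [Function.comp]
  congr 1
  omega

-- A's output as a map of chunks, divisible branch
theorem pvA_div (rn k : Int) (h : PySem.Int.mod rn k = 0) :
    roi_process_assign rn k =
      (PySem.List.pyRange 0 k 1).map
        (fun p => pvChunk (PySem.Int.truncdiv rn k * p) (PySem.Int.truncdiv rn k)) := by
  simp only [roi_process_assign, if_pos h, pvChunkA]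
  rw [PySem.List.foldl_append_singleton_eq_map, List.nil_append]

-- A's output as a map of chunks, non-divisible branch
theorem pvA_ndiv (rn k : Int) (h : ¬ PySem.Int.mod rn k = 0) :
    roi_process_assign rn k =
      (PySem.List.pyRange 0 k 1).map
        (fun p => if p ≤ k - 2
          then pvChunk (PySem.Int.floordiv rn (k-1) * p) (PySem.Int.floordiv rn (k-1))
          else pvChunk (PySem.Int.floordiv rn (k-1) * p)
                 (rn - PySem.Int.floordiv rn (k-1) * (k-1))) := by
  simp only [roi_process_assign, if_neg h, pvChunkA]
  have hstep : (fun (acc : List (List String)) (p : Int) =>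
      if p ≤ k - 2 then acc ++ [pvChunk (PySem.Int.floordiv rn (k-1) * p) (PySem.Int.floordiv rn (k-1))]
      else acc ++ [pvChunk (PySem.Int.floordiv rn (k-1) * p) (rn - PySem.Int.floordiv rn (k-1) * (k-1))])
      = fun acc p => acc ++ [if p ≤ k - 2
          then pvChunk (PySem.Int.floordiv rn (k-1) * p) (PySem.Int.floordiv rn (k-1))
          else pvChunk (PySem.Int.floordiv rn (k-1) * p) (rn - PySem.Int.floordiv rn (k-1) * (k-1))] := by
    funext acc p
    split <;> rfl
  rw [hstep, PySem.List.foldl_append_singleton_eq_map, List.nil_append]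

-- filter of a range by an interval is a range'
theorem pvFiltInterval (N a b : Nat) :
    (List.range N).filter (fun i => decide (a ≤ i ∧ i < b)) = List.range' a (min b N - a) := by
  induction N with
  | zero => simp
  | succ N ih =>
    rw [List.range_succ, List.filter_append, ih]
    by_cases h : a ≤ N ∧ N < b
    · have h1 : min b (N+1) - a = (min b N - a) + 1 := by omega
      have h2 : a + (min b N - a) = N := by omega
      rw [h1, List.range'_concat]
      simp only [one_mul]
      rw [h2]
      simp [h]
    · have h1 : min b (N+1) - a = min b N - a := by omega
      simp [h, h1]

theorem pvFiltLower (N a : Nat) :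
    (List.range N).filter (fun m => decide (a ≤ m)) = List.range' a (N - a) := by
  have h2 : (List.range N).filter (fun m => decide (a ≤ m ∧ m < N)) = List.range' a (N - a) := by
    rw [pvFiltInterval]; congr 1; omega
  rw [← h2]
  apply List.filter_congr
  intro m hm
  have hmN : m < N := List.mem_range.1 hm
  simp [hmN]

-- length of B's distributing fold
theorem pvDistLen {ι : Type} (f : ι → String) (g : ι → Nat) (L : List ι) (bs : List (List String)) :
    (L.foldl (fun bs i => bs.set (g i) ((bs.getD (g i) []) ++ [f i])) bs).length = bs.length := by
  induction L generalizing bs with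
  | nil => rfl
  | cons i L ih =>
    rw [List.foldl_cons, ih]
    simp

-- pointwise value of B's distributing fold
theorem pvDistGet {ι : Type} (f : ι → String) (g : ι → Nat) (L : List ι) (bs : List (List String))
    (j : Nat) (hj : j < bs.length) :
    (L.foldl (fun bs i => bs.set (g i) ((bs.getD (g i) []) ++ [f i])) bs).getD j []
      = bs.getD j [] ++ (L.filter (fun i => g i == j)).map f := by
  induction L generalizing bs with
  | nil => simp
  | cons i L ih =>
    rw [List.foldl_cons]
    have hj' : j < (bs.set (g i) ((bs.getD (g i) []) ++ [f i])).length := by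
      simpa using hj
    rw [ih _ hj']
    by_cases h : g i = j
    · subst h
      rw [List.getD_eq_getElem _ _ hj', List.getElem_set_self,
          List.getD_eq_getElem _ _ hj]
      simp
    · rw [List.getD_eq_getElem _ _ hj', List.getElem_set_ne (by omega),
          ← List.getD_eq_getElem _ ([] : List String) hj]
      simp [h]

-- B's bucket size and bucket function
def pvQ (rn k : Int) : Int :=
  if PySem.Int.mod rn k = 0 then PySem.Int.floordiv rn k else PySem.Int.floordiv rn (k-1)

def pvG (rn k : Int) (m : Nat) : Nat :=
  (if 0 < pvQ rn k ∧ PySem.Int.floordiv (m:Int) (pvQ rn k) < k - 1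
   then PySem.Int.floordiv (m:Int) (pvQ rn k) else k - 1).toNat

-- B's fold in normal form over Nat indices
theorem pvB_pos (rn k : Int) (hk : 1 ≤ k) :
    roi_process_assign_alt rn k =
      (List.range rn.toNat).foldl
        (fun bs m => bs.set (pvG rn k m)
          ((bs.getD (pvG rn k m) []) ++ [PySem.Int.toStr ((m:Int) + 1)]))
        (List.replicate k.toNat []) := by
  simp only [roi_process_assign_alt, if_pos hk, PySem.List.pyRange_one, List.foldl_map,
    zero_add, Int.sub_zero, pvG, pvQ]

theorem pvB_len (rn k : Int) (hk : 1 ≤ k) :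
    (roi_process_assign_alt rn k).length = k.toNat := by
  rw [pvB_pos rn k hk, pvDistLen, List.length_replicate]

theorem pvB_getD (rn k : Int) (hk : 1 ≤ k) (j : Nat) (hj : j < k.toNat) :
    (roi_process_assign_alt rn k).getD j []
      = ((List.range rn.toNat).filter (fun m => pvG rn k m == j)).map
          (fun (m : Nat) => PySem.Int.toStr ((m:Int) + 1)) := by
  rw [pvB_pos rn k hk,
      pvDistGet (fun m : Nat => PySem.Int.toStr ((m:Int) + 1)) (pvG rn k) _ _ j (by simpa using hj),
      List.getD_replicate _ hj, List.nil_append]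

theorem pvB_negk (rn k : Int) (hk : k ≤ 0) : roi_process_assign_alt rn k = [] := by
  simp [roi_process_assign_alt, show ¬ (1:Int) ≤ k by omega, show k.toNat = 0 by omega]

theorem pvB_nonpos (rn k : Int) (hrn : rn ≤ 0) (hk : 1 ≤ k) :
    roi_process_assign_alt rn k = List.replicate k.toNat [] := by
  rw [pvB_pos rn k hk, show rn.toNat = 0 by omega]
  simp

theorem pvA_negk (rn k : Int) (hk : k ≤ 0) : roi_process_assign rn k = [] := by
  unfold roi_process_assign
  split <;> rw [PySem.List.pyRange_one_eq_nil (by omega)] <;> rfl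

theorem pvMapEmpty (k : Int) (F : Int → List String)
    (hF : ∀ p ∈ PySem.List.pyRange 0 k 1, F p = []) :
    (PySem.List.pyRange 0 k 1).map F = List.replicate k.toNat [] := by
  rw [List.map_congr_left hF, List.map_const', PySem.List.length_pyRange_one]
  congr 1
  omega

theorem pvA_nonpos_div (rn k : Int) (hrn : rn ≤ 0) (hk : 1 ≤ k)
    (h : PySem.Int.mod rn k = 0) :
    roi_process_assign rn k = List.replicate k.toNat [] := by
  have hdvd : k ∣ rn := (PySem.Int.mod_eq_zero_iff_dvd _ _).1 h
  have hq : PySem.Int.truncdiv rn k ≤ 0 := by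
    show rn.tdiv k ≤ 0
    rw [Int.tdiv_eq_ediv_of_dvd hdvd]
    by_contra h'
    have h'' : 0 < rn / k := not_le.mp h'
    have h2 : rn / k * k = rn := Int.ediv_mul_cancel hdvd
    nlinarith
  rw [pvA_div _ _ h]
  apply pvMapEmpty
  intro p _
  simp [pvChunk, Int.toNat_of_nonpos hq]

theorem pvA_nonpos_ndiv (rn k : Int) (hrn : rn ≤ 0) (hk : 1 ≤ k)
    (h : ¬ PySem.Int.mod rn k = 0) (h2 : PySem.Int.mod rn (k-1) = 0) :
    roi_process_assign rn k = List.replicate k.toNat [] := by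
  have hk2 : 2 ≤ k := by
    by_contra h'
    have hk1 : k = 1 := by omega
    exact h (by rw [hk1]; exact (PySem.Int.mod_eq_zero_iff_dvd _ _).2 (one_dvd _))
  have hdvd : (k-1) ∣ rn := (PySem.Int.mod_eq_zero_iff_dvd _ _).1 h2
  have hmul : rn / (k-1) * (k-1) = rn := Int.ediv_mul_cancel hdvd
  have hq : PySem.Int.floordiv rn (k-1) ≤ 0 := by
    show rn.fdiv (k-1) ≤ 0
    rw [Int.fdiv_eq_ediv_of_dvd hdvd]
    by_contra h'
    have h'' : 0 < rn / (k-1) := not_le.mp h'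
    nlinarith
  have hrest : rn - PySem.Int.floordiv rn (k-1) * (k-1) = 0 := by
    have hf : PySem.Int.floordiv rn (k-1) = rn / (k-1) := by
      show rn.fdiv (k-1) = rn / (k-1)
      exact Int.fdiv_eq_ediv_of_dvd hdvd
    rw [hf, hmul]
    ring
  rw [pvA_ndiv _ _ h]
  apply pvMapEmpty
  intro p _
  split
  · simp [pvChunk, Int.toNat_of_nonpos hq]
  · rw [hrest]
    simp [pvChunk]

-- Bool-level bridge: a beq test equals a decide of an equivalent proposition
theorem pvBeqDecide (x j : Nat) (P : Prop) [Decidable P] (h : x = j ↔ P) :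
    (x == j) = decide P := by
  by_cases hp : P
  · simp [hp, h.2 hp]
  · simp only [hp, decide_false]
    rw [beq_eq_false_iff_ne]
    exact fun hx => hp (h.1 hx)

theorem pvBucketIffMid (q' K j m : Nat) (hq : 0 < q') (hjlt : j < K - 1) :
    ((if 0 < q' ∧ m / q' < K - 1 then m / q' else K - 1) = j)
      ↔ (j*q' ≤ m ∧ m < (j+1)*q') := by
  have hle : j ≤ m / q' ↔ j * q' ≤ m := Nat.le_div_iff_mul_le hq
  have hlt : m / q' < j+1 ↔ m < (j+1) * q' := Nat.div_lt_iff_lt_mul hq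
  by_cases hc : m / q' < K - 1
  · rw [if_pos ⟨hq, hc⟩]
    constructor
    · intro h
      subst h
      exact ⟨hle.1 (le_refl _), hlt.1 (by omega)⟩
    · rintro ⟨a, b⟩
      have ha := hle.2 a
      have hb := hlt.2 b
      omega
  · rw [if_neg (by tauto)]
    constructor
    · intro h
      omega
    · rintro ⟨a, b⟩
      have ha := hle.2 a
      have hb := hlt.2 b
      omega

theorem pvBucketIffLast (q' K m : Nat) :
    ((if 0 < q' ∧ m / q' < K - 1 then m / q' else K - 1) = K - 1)
      ↔ ((K - 1) * q' ≤ m) := by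
  by_cases hq : 0 < q'
  · have hle : K - 1 ≤ m / q' ↔ (K-1) * q' ≤ m := Nat.le_div_iff_mul_le hq
    by_cases hc : m / q' < K - 1
    · rw [if_pos ⟨hq, hc⟩]
      constructor
      · intro h
        omega
      · intro h
        have := hle.2 h
        omega
    · rw [if_neg (by tauto)]
      exact ⟨fun _ => hle.1 (by omega), fun _ => rfl⟩
  · have hq0 : q' = 0 := by omega
    rw [if_neg (by tauto), hq0]
    simp

theorem pvFiltMid (N q' K j : Nat) (hq : 0 < q') (hjlt : j < K - 1) (hub : (j+1)*q' ≤ N) :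
    (List.range N).filter (fun m => (if 0 < q' ∧ m / q' < K - 1 then m / q' else K - 1) == j)
      = List.range' (j*q') q' := by
  rw [List.filter_congr (fun m _ => pvBeqDecide _ j _ (pvBucketIffMid q' K j m hq hjlt)),
      pvFiltInterval]
  have h1 : min ((j+1)*q') N = (j+1)*q' := by omega
  have h2 : (j+1)*q' = j*q' + q' := by ring
  rw [h1]
  congr 1
  omega

theorem pvFiltMidZero (N q' K j : Nat) (hq0 : q' = 0) (hjlt : j < K - 1) :
    (List.range N).filter (fun m => (if 0 < q' ∧ m / q' < K - 1 then m / q' else K - 1) == j)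
      = [] := by
  subst hq0
  have h : ∀ m ∈ List.range N,
      ((if (0:Nat) < 0 ∧ m / 0 < K - 1 then m / 0 else K - 1) == j) = (fun (_ : Nat) => false) m := by
    intro m _
    simp only [lt_irrefl, false_and, if_false]
    rw [beq_eq_false_iff_ne]
    omega
  rw [List.filter_congr h]
  simp

theorem pvFiltLast (N q' K : Nat) :
    (List.range N).filter (fun m => (if 0 < q' ∧ m / q' < K - 1 then m / q' else K - 1) == (K-1))
      = List.range' ((K-1)*q') (N - (K-1)*q') := by
  rw [List.filter_congr (fun m _ => pvBeqDecide _ (K-1) _ (pvBucketIffLast q' K m))]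
  exact pvFiltLower N _

theorem pvChunkRange' (a len : Nat) :
    (List.range' a len).map (fun (m : Nat) => PySem.Int.toStr ((m:Int) + 1)) = pvChunk (a:Int) (len:Int) := by
  rw [List.range'_eq_map_range, List.map_map]
  simp only [pvChunk, Int.toNat_natCast]
  apply List.map_congr_left
  intro t _
  simp only [Function.comp]
  congr 1
  push_cast
  ring

theorem pvG_eval (rn k : Int) (q' K : Nat) (hQ : pvQ rn k = (q':Int)) (hK : k = (K:Int))
    (hK1 : 1 ≤ K) (m : Nat) :
    pvG rn k m = if 0 < q' ∧ m / q' < K - 1 then m / q' else K - 1 := by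
  have hKm : (K:Int) - 1 = ((K - 1 : Nat) : Int) := by omega
  unfold pvG
  rw [hQ, hK, PySem.Int.floordiv_natCast]
  by_cases h : 0 < q' ∧ m / q' < K - 1
  · have hI : 0 < (q':Int) ∧ ((m / q' : Nat) : Int) < (K:Int) - 1 := by
      refine ⟨by exact_mod_cast h.1, ?_⟩
      rw [hKm]
      exact_mod_cast h.2
    rw [if_pos hI, if_pos h]
    exact Int.toNat_natCast _
  · have hI : ¬ (0 < (q':Int) ∧ ((m / q' : Nat) : Int) < (K:Int) - 1) := by
      intro hcon
      apply h
      refine ⟨by exact_mod_cast hcon.1, ?_⟩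
      have hb := hcon.2
      rw [hKm] at hb
      exact_mod_cast hb
    rw [if_neg hI, if_neg h]
    omega

-- the main positive case: roi_num ≥ 1, n_round ≥ 1
theorem pvMain (rn k : Int) (hrn : 1 ≤ rn) (hk : 1 ≤ k) :
    roi_process_assign rn k = roi_process_assign_alt rn k := by
  obtain ⟨N, hN⟩ : ∃ N : Nat, rn = (N:Int) := ⟨rn.toNat, by omega⟩
  obtain ⟨K, hK⟩ : ∃ K : Nat, k = (K:Int) := ⟨k.toNat, by omega⟩
  subst hN
  subst hK
  have hN1 : 1 ≤ N := by exact_mod_cast hrn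
  have hK1 : 1 ≤ K := by exact_mod_cast hk
  have hKt : ((K:Int)).toNat = K := by omega
  have hNt : ((N:Int)).toNat = N := by omega
  by_cases hdiv : PySem.Int.mod (N:Int) (K:Int) = 0
  · -- divisible branch
    set q' := N / K with hq'def
    have hdvd : (K:Int) ∣ (N:Int) := (PySem.Int.mod_eq_zero_iff_dvd _ _).1 hdiv
    have hdvdN : K ∣ N := by exact_mod_cast hdvd
    have hNKq : N = K * q' := (Nat.mul_div_cancel' hdvdN).symm
    have hq'pos : 0 < q' := by
      rcases Nat.eq_zero_or_pos q' with h0 | h0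
      · rw [h0, Nat.mul_zero] at hNKq
        omega
      · exact h0
    have hQ : pvQ (N:Int) (K:Int) = (q':Int) := by
      unfold pvQ
      rw [if_pos hdiv]
      exact PySem.Int.floordiv_natCast N K
    have htd : PySem.Int.truncdiv (N:Int) (K:Int) = (q':Int) := by
      show ((N:Int)).tdiv (K:Int) = (q':Int)
      rw [Int.tdiv_eq_ediv_of_dvd hdvd, ← Int.fdiv_eq_ediv_of_dvd hdvd]
      exact PySem.Int.floordiv_natCast N K
    rw [pvA_div _ _ hdiv]
    apply List.ext_getElem
    · rw [List.length_map, PySem.List.length_pyRange_one, pvB_len _ _ hk, hKt]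
      omega
    · intro j h1 h2
      have hjK : j < K := by
        rw [List.length_map, PySem.List.length_pyRange_one] at h1
        omega
      rw [List.getElem_map, PySem.List.getElem_pyRange_one, htd,
          ← List.getD_eq_getElem _ ([] : List String) h2, pvB_getD _ _ hk j (by omega), hNt,
          List.filter_congr (fun m _ => by rw [pvG_eval (N:Int) (K:Int) q' K hQ rfl hK1 m])]
      rcases Nat.lt_or_ge j (K - 1) with hjlt | hjge
      · rw [pvFiltMid N q' K j hq'pos hjlt (by rw [hNKq]; exact Nat.mul_le_mul_right q' (by omega)),
            pvChunkRange']
        congr 1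
        push_cast
        ring
      · have hjeq : j = K - 1 := by omega
        subst hjeq
        have hq'le : q' ≤ K * q' := by
          calc q' = 1 * q' := (one_mul q').symm
          _ ≤ K * q' := Nat.mul_le_mul_right q' hK1
        have hsz : N - (K-1)*q' = q' := by
          rw [Nat.sub_one_mul]
          omega
        rw [pvFiltLast N q' K, pvChunkRange', hsz,
            show (((K-1)*q' : Nat) : Int) = (q':Int) * (0 + ((K-1 : Nat):Int)) by push_cast; ring]
  · -- non-divisible branch
    have hK2 : 2 ≤ K := by
      by_contra h'
      have hk1 : K = 1 := by omega
      apply hdiv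
      rw [hk1]
      exact (PySem.Int.mod_eq_zero_iff_dvd _ _).2 (by simp)
    set q' := N / (K-1) with hq'def
    have hKm1 : ((K:Int)) - 1 = ((K-1 : Nat) : Int) := by omega
    have hQ : pvQ (N:Int) (K:Int) = (q':Int) := by
      unfold pvQ
      rw [if_neg hdiv, hKm1]
      exact PySem.Int.floordiv_natCast N (K-1)
    have hfd : PySem.Int.floordiv (N:Int) ((K:Int) - 1) = (q':Int) := by
      rw [hKm1]
      exact PySem.Int.floordiv_natCast N (K-1)
    have hP : q' * (K-1) ≤ N := Nat.div_mul_le_self N (K-1)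
    have hrest : (N:Int) - (q':Int) * ((K:Int) - 1) = ((N - q'*(K-1) : Nat) : Int) := by
      have hcast : ((q'*(K-1) : Nat) : Int) = (q':Int) * ((K:Int) - 1) := by
        push_cast [Nat.cast_sub hK1]
        ring
      omega
    rw [pvA_ndiv _ _ hdiv]
    apply List.ext_getElem
    · rw [List.length_map, PySem.List.length_pyRange_one, pvB_len _ _ hk, hKt]
      omega
    · intro j h1 h2
      have hjK : j < K := by
        rw [List.length_map, PySem.List.length_pyRange_one] at h1
        omega
      rw [List.getElem_map, PySem.List.getElem_pyRange_one,
          ← List.getD_eq_getElem _ ([] : List String) h2, pvB_getD _ _ hk j (by omega), hNt,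
          List.filter_congr (fun m _ => by rw [pvG_eval (N:Int) (K:Int) q' K hQ rfl hK1 m])]
      rcases Nat.lt_or_ge j (K - 1) with hjlt | hjge
      · rw [if_pos (by omega : (0:Int) + (j:Int) ≤ (K:Int) - 2), hfd]
        rcases Nat.eq_zero_or_pos q' with hq0 | hqpos
        · rw [pvFiltMidZero N q' K j hq0 hjlt]
          simp [pvChunk, hq0]
        · have hub : (j+1)*q' ≤ N := by
            calc (j+1)*q' ≤ (K-1)*q' := Nat.mul_le_mul_right q' (by omega)
            _ = q' * (K-1) := by ring
            _ ≤ N := hP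
          rw [pvFiltMid N q' K j hqpos hjlt hub, pvChunkRange',
              show ((j*q' : Nat) : Int) = (q':Int) * (0 + (j:Int)) by push_cast; ring]
      · have hjeq : j = K - 1 := by omega
        subst hjeq
        rw [if_neg (by omega : ¬ ((0:Int) + ((K-1 : Nat):Int) ≤ (K:Int) - 2)), hfd,
            pvFiltLast N q' K, pvChunkRange', Nat.mul_comm (K-1) q', hrest,
            show ((q'*(K-1) : Nat) : Int) = (q':Int) * (0 + ((K-1 : Nat):Int)) by push_cast; ring]

-- ===== VERDICT (by name: the statement is the Claim_ definition above) =====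
theorem roi_process_assign_spec : Claim_unchanged_roi_process_assign := by
  intro rn k _ hpre hD
  unfold Pre_roi_process_assign at hpre
  show roi_process_assign rn k = roi_process_assign_alt rn k
  by_cases hk : 1 ≤ k
  · by_cases hrn : 1 ≤ rn
    · exact pvMain rn k hrn hk
    · have hrn' : rn ≤ 0 := by omega
      by_cases hdiv : PySem.Int.mod rn k = 0
      · rw [pvA_nonpos_div rn k hrn' hk hdiv, pvB_nonpos rn k hrn' hk]
      · have hrneg : rn < 0 := by
          rcases lt_or_eq_of_le hrn' with h | h
          · exact h
          · exact absurd ((PySem.Int.mod_eq_zero_iff_dvd _ _).2 (by simp [h])) hdiv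
        have hk2 : 2 ≤ k := by
          by_contra h'
          have hk1 : k = 1 := by omega
          exact hdiv (by rw [hk1]; exact (PySem.Int.mod_eq_zero_iff_dvd _ _).2 (one_dvd _))
        have hmod1 : PySem.Int.mod rn (k-1) = 0 := by
          by_contra h'
          exact hD ((pvD_iff rn k).2 ⟨hrneg, hk2, hdiv, h'⟩)
        rw [pvA_nonpos_ndiv rn k hrn' hk hdiv hmod1, pvB_nonpos rn k hrn' hk]
  · rw [pvA_negk rn k (by omega), pvB_negk rn k (by omega)]

theorem roi_process_assign_changed : Claim_changed_roi_process_assign := by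
  unfold Claim_changed_roi_process_assign
  decide
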